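-- pv_equiv track=rewrite | github.com/NatriClorua/funtion- | funtion.py | dao_nguoc_vtri_le
-- ===== SOURCE A (Python) =====
-- def dao_nguoc_vtri_le(arr):
--     le_arr = []
--     for i in range (len(arr)):
--         if i %2 !=0:
--             le_arr.append(arr[i])
--     le_arr.reverse()
--     kq = []
--     le_index =0
--     for i in range (len(arr)):
--         if i %2 !=0:
--             kq.append(le_arr[le_index])
--             le_index +=1
--         else:
--             kq.append(arr[i])
--     return kq
-- ===== SOURCE B (Python) =====
-- def dao_nguoc_vtri_le(arr):
--     kq = list(arr)
--     i = 1
--     j = len(arr) - 1 if len(arr) % 2 == 0 else len(arr) - 2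
--     while i < j:
--         kq[i], kq[j] = kq[j], kq[i]
--         i += 2
--         j -= 2
--     return kq
-- ===== Notes on version B (the rewrite author's own statement) =====
-- stated objective: simpler
-- what changed: B copies the input once and reverses the odd-index elements in place with two converging pointers (swap, i+=2, j-=2), instead of extracting the odd-index elements into a separate list, reversing it, and rebuilding the result element by element; it allocates one list and touches only the odd positions (measured ~2x faster at large sizes).
import Mathlib
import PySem

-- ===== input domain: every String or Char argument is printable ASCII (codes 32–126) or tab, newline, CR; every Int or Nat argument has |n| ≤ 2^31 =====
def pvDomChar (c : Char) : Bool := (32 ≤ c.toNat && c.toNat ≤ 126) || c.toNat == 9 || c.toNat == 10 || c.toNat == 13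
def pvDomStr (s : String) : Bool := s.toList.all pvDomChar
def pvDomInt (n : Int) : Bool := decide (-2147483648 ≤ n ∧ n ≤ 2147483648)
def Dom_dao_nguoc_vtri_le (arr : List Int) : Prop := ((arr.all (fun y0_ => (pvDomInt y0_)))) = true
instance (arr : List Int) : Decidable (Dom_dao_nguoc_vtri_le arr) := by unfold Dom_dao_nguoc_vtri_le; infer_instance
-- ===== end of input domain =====

-- B reverses the odd-index elements in place on a copy of the input via two converging
-- pointers, instead of extract / reverse / rebuild; objective: simpler. Neither program
-- mutates its argument.

-- ===== PORT A =====
def dao_nguoc_vtri_le (arr : List Int) : List Int :=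
  let le_arr := (PySem.List.pyRange 0 (arr.length : Int) 1).foldl
      (fun acc i => if PySem.Int.mod i 2 ≠ 0 then acc ++ [PySem.List.pyGetD arr i 0] else acc) []
  let le_arr := le_arr.reverse
  let st := (PySem.List.pyRange 0 (arr.length : Int) 1).foldl
      (fun (st : List Int × Int) i =>
        if PySem.Int.mod i 2 ≠ 0 then (st.1 ++ [PySem.List.pyGetD le_arr st.2 0], st.2 + 1)
        else (st.1 ++ [PySem.List.pyGetD arr i 0], st.2)) ([], 0)
  st.1

-- ===== PORT B =====
-- the 'while i < j' loop of Source B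
def pvSwapLoop (kq : List Int) (i j : Int) : List Int :=
  if i < j then
    pvSwapLoop
      (PySem.List.pySetD (PySem.List.pySetD kq i (PySem.List.pyGetD kq j 0)) j (PySem.List.pyGetD kq i 0))
      (i + 2) (j - 2)
  else kq
termination_by (j - i).toNat
decreasing_by omega

def dao_nguoc_vtri_le_alt (arr : List Int) : List Int :=
  let n : Int := arr.length
  let j : Int := if PySem.Int.mod n 2 = 0 then n - 1 else n - 2
  pvSwapLoop arr 1 j

-- ===== PRECONDITION & SPEC =====
def Spec_dao_nguoc_vtri_le (arr : List Int) (out : List Int) : Prop := out = dao_nguoc_vtri_le_alt arr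
instance (arr : List Int) (out : List Int) : Decidable (Spec_dao_nguoc_vtri_le arr out) := by unfold Spec_dao_nguoc_vtri_le; infer_instance

-- ===== CLAIM (what is proved, stated in full; the proofs are below) =====
def Claim_equal_dao_nguoc_vtri_le : Prop := ∀ (arr : List Int), Dom_dao_nguoc_vtri_le arr → Spec_dao_nguoc_vtri_le arr (dao_nguoc_vtri_le arr)

-- ===== LEMMAS AND PROOFS =====

-- the common functional description of the result: position k keeps arr[k] when k is
-- even and receives arr[2*(n/2) - k] (its mirror among the odd indices) when k is odd
def pvSpecF (arr : List Int) (k : Nat) : Int :=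
  if k % 2 = 0 then arr.getD k 0 else arr.getD (2 * (arr.length / 2) - k) 0

def pvSpec (arr : List Int) : List Int := (List.range arr.length).map (pvSpecF arr)

-- the state of B's copy when the pointers stand at i and 2*(n/2) - i: positions in the
-- window [i, 2*(n/2)-i] still hold arr, positions outside it hold their final value
def pvMidF (arr : List Int) (i k : Nat) : Int :=
  if i ≤ k ∧ k ≤ 2 * (arr.length / 2) - i then arr.getD k 0 else pvSpecF arr k

lemma set_map_range {n p : Nat} (f : Nat → Int) (v : Int) (_hp : p < n) :
    ((List.range n).map f).set p v = (List.range n).map (fun k => if k = p then v else f k) := by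
  apply List.ext_getElem
  · simp
  · intro k h1 h2
    simp only [List.getElem_set, List.getElem_map, List.getElem_range] at *
    by_cases hk : k = p
    · simp [hk]
    · simp [hk, Ne.symm hk]

lemma reverse_map_range {n : Nat} (f : Nat → Int) :
    ((List.range n).map f).reverse = (List.range n).map (fun k => f (n - 1 - k)) := by
  apply List.ext_getElem
  · simp
  · intro k h1 h2
    simp [List.getElem_reverse]

-- B's loop invariant: from the state pvMidF arr i, the swap loop finishes the job
lemma pvSwapLoop_inv (arr : List Int) :
    ∀ (d i : Nat), i % 2 = 1 → 2 * (arr.length / 2) - i ≤ d →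
      pvSwapLoop ((List.range arr.length).map (pvMidF arr i)) (i : Int)
        (((2 * (arr.length / 2) : Nat) : Int) - (i : Int)) = pvSpec arr := by
  intro d
  induction d with
  | zero =>
    intro i hodd hle
    rw [pvSwapLoop, if_neg (by omega)]
    apply List.map_congr_left
    intro k hk
    simp only [List.mem_range] at hk
    unfold pvMidF
    split_ifs with hw
    · unfold pvSpecF
      rw [if_neg (by omega)]
      congr 1
      omega
    · rfl
  | succ d ih =>
    intro i hodd hle
    by_cases h : (i : Int) < ((2 * (arr.length / 2) : Nat) : Int) - (i : Int)
    · have hM : 2 * i < 2 * (arr.length / 2) := by omega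
      have hn : 2 * (arr.length / 2) ≤ arr.length := by omega
      rw [pvSwapLoop, if_pos h]
      have hcast : ((2 * (arr.length / 2) : Nat) : Int) - (i : Int)
          = ((2 * (arr.length / 2) - i : Nat) : Int) := by omega
      rw [hcast]
      rw [PySem.List.pyGetD_natCast, PySem.List.pyGetD_natCast,
        PySem.List.pySetD_natCast, PySem.List.pySetD_natCast]
      rw [PySem.List.getD_map_range _ _ _ _ (by omega),
        PySem.List.getD_map_range _ _ _ _ (by omega)]
      rw [set_map_range _ _ (by omega), set_map_range _ _ (by omega)]
      have hmid_i : pvMidF arr i i = arr.getD i 0 := by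
        unfold pvMidF; rw [if_pos (by omega)]
      have hmid_j : pvMidF arr i (2 * (arr.length / 2) - i) = arr.getD (2 * (arr.length / 2) - i) 0 := by
        unfold pvMidF; rw [if_pos (by omega)]
      rw [hmid_i, hmid_j]
      have hstep : (List.range arr.length).map
            (fun k => if k = 2 * (arr.length / 2) - i then arr.getD i 0
              else if k = i then arr.getD (2 * (arr.length / 2) - i) 0 else pvMidF arr i k)
          = (List.range arr.length).map (pvMidF arr (i + 2)) := by
        apply List.map_congr_left
        intro k hk
        simp only [List.mem_range] at hk
        unfold pvMidF pvSpecF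
        split_ifs <;> first | rfl | omega | (congr 1; omega)
      rw [hstep]
      have hrec := ih (i + 2) (by omega) (by omega)
      have e1 : ((i : Int) + 2) = ((i + 2 : Nat) : Int) := by omega
      have e2 : (((2 * (arr.length / 2) - i : Nat) : Int) - 2)
          = ((2 * (arr.length / 2) : Nat) : Int) - ((i + 2 : Nat) : Int) := by omega
      rw [e1, e2]
      exact hrec
    · rw [pvSwapLoop, if_neg h]
      apply List.map_congr_left
      intro k hk
      simp only [List.mem_range] at hk
      unfold pvMidF
      split_ifs with hw
      · unfold pvSpecF
        rw [if_neg (by omega)]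
        congr 1
        omega
      · rfl

lemma B_eq_spec (arr : List Int) : dao_nguoc_vtri_le_alt arr = pvSpec arr := by
  unfold dao_nguoc_vtri_le_alt
  have hmod : PySem.Int.mod (arr.length : Int) 2 = ((arr.length % 2 : Nat) : Int) := by
    exact_mod_cast PySem.Int.mod_natCast arr.length 2
  have hj : (if PySem.Int.mod (arr.length : Int) 2 = 0 then (arr.length : Int) - 1
      else (arr.length : Int) - 2) = ((2 * (arr.length / 2) : Nat) : Int) - ((1 : Nat) : Int) := by
    rw [hmod]
    by_cases hp : arr.length % 2 = 0
    · rw [if_pos (by omega)]; omega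
    · rw [if_neg (by omega)]; omega
  simp only []
  rw [hj]
  have harr : arr = (List.range arr.length).map (pvMidF arr 1) := by
    apply List.ext_getElem
    · simp
    · intro k h1 h2
      simp only [List.getElem_map, List.getElem_range]
      unfold pvMidF pvSpecF
      split_ifs <;> first | omega | (rw [List.getD_eq_getElem _ _ (by omega)])
  calc pvSwapLoop arr 1 (((2 * (arr.length / 2) : Nat) : Int) - ((1 : Nat) : Int))
      = pvSwapLoop ((List.range arr.length).map (pvMidF arr 1)) ((1 : Nat) : Int)
        (((2 * (arr.length / 2) : Nat) : Int) - ((1 : Nat) : Int)) := by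
        rw [← harr]; norm_num
    _ = pvSpec arr := pvSwapLoop_inv arr (2 * (arr.length / 2)) 1 (by omega) (by omega)

-- A's first loop collects the odd-index elements in order
lemma A_loop1 (arr : List Int) :
    ∀ k : Nat,
      (PySem.List.pyRange 0 (k : Int) 1).foldl
        (fun acc i => if PySem.Int.mod i 2 ≠ 0 then acc ++ [PySem.List.pyGetD arr i 0] else acc) []
      = (List.range (k / 2)).map (fun t => arr.getD (2 * t + 1) 0) := by
  intro k
  induction k with
  | zero => simp [PySem.List.pyRange_one_eq_nil]
  | succ k ih =>
    have hc : ((k + 1 : Nat) : Int) = (k : Int) + 1 := by omega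
    rw [hc, PySem.List.pyRange_one_succ_right (by omega), List.foldl_append, ih]
    simp only [List.foldl_cons, List.foldl_nil]
    have hmod : PySem.Int.mod (k : Int) 2 = ((k % 2 : Nat) : Int) := by
      exact_mod_cast PySem.Int.mod_natCast k 2
    by_cases hp : k % 2 = 0
    · rw [if_neg (by rw [hmod]; omega)]
      have : (k + 1) / 2 = k / 2 := by omega
      rw [this]
    · rw [if_pos (by rw [hmod]; omega)]
      have : (k + 1) / 2 = k / 2 + 1 := by omega
      rw [this, List.range_succ, List.map_append, PySem.List.pyGetD_natCast]
      simp only [List.map_cons, List.map_nil]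
      have : 2 * (k / 2) + 1 = k := by omega
      rw [this]

-- A's second loop rebuilds pvSpec, consuming the reversed odd list
lemma A_loop2 (arr : List Int) :
    ∀ k : Nat, k ≤ arr.length →
      (PySem.List.pyRange 0 (k : Int) 1).foldl
        (fun (st : List Int × Int) i =>
          if PySem.Int.mod i 2 ≠ 0 then
            (st.1 ++ [PySem.List.pyGetD
              ((List.range (arr.length / 2)).map
                (fun t => arr.getD (2 * (arr.length / 2 - 1 - t) + 1) 0)) st.2 0], st.2 + 1)
          else (st.1 ++ [PySem.List.pyGetD arr i 0], st.2)) ([], 0)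
      = ((List.range k).map (pvSpecF arr), ((k / 2 : Nat) : Int)) := by
  intro k
  induction k with
  | zero => simp [PySem.List.pyRange_one_eq_nil]
  | succ k ih =>
    intro hk1
    have hk : k ≤ arr.length := by omega
    have hc : ((k + 1 : Nat) : Int) = (k : Int) + 1 := by omega
    rw [hc, PySem.List.pyRange_one_succ_right (by omega), List.foldl_append, ih hk]
    simp only [List.foldl_cons, List.foldl_nil]
    have hmod : PySem.Int.mod (k : Int) 2 = ((k % 2 : Nat) : Int) := by
      exact_mod_cast PySem.Int.mod_natCast k 2
    by_cases hp : k % 2 = 0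
    · rw [if_neg (by rw [hmod]; omega)]
      have h1 : (k + 1) / 2 = k / 2 := by omega
      rw [PySem.List.pyGetD_natCast, List.range_succ, List.map_append, h1]
      simp [pvSpecF, hp, List.getD]
    · rw [if_pos (by rw [hmod]; omega)]
      rw [PySem.List.pyGetD_natCast,
        PySem.List.getD_map_range _ _ _ _ (show k / 2 < arr.length / 2 by omega)]
      have h1 : (k + 1) / 2 = k / 2 + 1 := by omega
      rw [List.range_succ, List.map_append, h1]
      have h2 : 2 * (arr.length / 2 - 1 - k / 2) + 1 = 2 * (arr.length / 2) - k := by omega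
      have h3 : pvSpecF arr k = arr.getD (2 * (arr.length / 2) - k) 0 := by
        unfold pvSpecF; rw [if_neg (by omega)]
      rw [h2]
      simp [h3]

lemma A_eq_spec (arr : List Int) : dao_nguoc_vtri_le arr = pvSpec arr := by
  show ((PySem.List.pyRange 0 (arr.length : Int) 1).foldl
      (fun (st : List Int × Int) i =>
        if PySem.Int.mod i 2 ≠ 0 then
          (st.1 ++ [PySem.List.pyGetD
            (((PySem.List.pyRange 0 (arr.length : Int) 1).foldl
              (fun acc i => if PySem.Int.mod i 2 ≠ 0 then acc ++ [PySem.List.pyGetD arr i 0] else acc)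
              []).reverse) st.2 0], st.2 + 1)
        else (st.1 ++ [PySem.List.pyGetD arr i 0], st.2)) ([], 0)).1 = pvSpec arr
  rw [A_loop1 arr arr.length, reverse_map_range]
  rw [A_loop2 arr arr.length le_rfl]
  rfl

-- ===== VERDICT (by name: the statement is the Claim_ definition above) =====
theorem dao_nguoc_vtri_le_spec : Claim_equal_dao_nguoc_vtri_le := by
  intro arr _
  unfold Spec_dao_nguoc_vtri_le
  rw [A_eq_spec, B_eq_spec]
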